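-- pv_equiv track=rewrite | github.com/ethyca/fides | fidesctl/src/fidesctl/core/visualize.py | nested_categories_to_html_list
-- ===== SOURCE A (Python) =====
-- from typing import Generator, List
--
-- FIDES_KEY_NAME = 'fides_key'
--
-- FIDES_PARENT_NAME = 'parent_key'
--
-- def convert_categories_to_nested_dict(categories: List[dict]) -> dict:
--     """
--     Convert a catalog yaml file into a hierarchical nested dictionary.
--     Leaf nodes will have an empty dictionary as the value.
--
--     e.g.:
--
--     {Parent1:
--         {
--             Child1: {},
--             Child2: {},
--             Parent2: {
--                 Child3: {}
--                 }
--         }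
--     }
--
--     Args:
--         categories : list of dictionaries containing each entry from a catalog yaml file
--
--     Returns:
--
--     """
--
--     def nested_dict(data: dict, keys: List) -> None:
--         """
--         Create a nested dictionary given a list of strings as a key path
--         Args:
--             data: Dictionary to contain the nested dictionary as it's built
--             keys: List of keys that equates to the 'path' down the nested dictionary
--
--         Returns:
--             None
--         """
--         for key in keys:
--             if key in data:
--                 if key == keys[-1]:
--                     # we've reached the end of the path (no more children)
--                     data[key] = {}
--                 data = data[key]
--             else:
--                 data[key] = {}
--
--     nested_output = {}
--     for c in categories:
--         if FIDES_PARENT_NAME not in c: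
--             nested_output[c[FIDES_KEY_NAME]] = {}
--         else:
--             category_path = c[FIDES_KEY_NAME].split('.')
--             nested_dict(nested_output, category_path)
--     return nested_output
--
-- def nested_categories_to_html_list(categories: List[dict],
--                                    indent: int = 1) -> str:
--     """
--     Create an HTML string unordered list from the keys of a nested dictionary
--     Args:
--         categories: list of the dictionaries for each taxonomy member
--         indent: spacing multiplier
--
--     Returns:
--
--     """
--     nested_categories = convert_categories_to_nested_dict(categories)
--
--     def nest_to_html(nested_dict, indent_factor) -> Generator:
--         """
--         Create the html
--         Args:
--             nested_dict: nested dictionary for keys to convert to html list object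
--             indent_factor: spacing multiplier
--
--         Returns:
--             HTML string containing a nested, unordered list of the nested dictionary keys
--         """
--         spacing = '   ' * indent_factor
--         for k, v in nested_dict.items():
--             yield '{}<li>{}</li>'.format(spacing, k)
--             if isinstance(v, dict):
--                 yield '{}<ul>\n{}\n{}</ul>'.format(
--                     spacing,
--                     "\n".join(nest_to_html(v, indent_factor + 1)),
--                     spacing
--                 )
--     header = '<h2>Fides Data Category Hierarchy</h2>'
--     categories_tree = '\n'.join(nest_to_html(nested_categories, indent))
--     return f'{header}\n{categories_tree}'
-- ===== SOURCE B (Python) =====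
-- from typing import List
--
-- FIDES_KEY_NAME = 'fides_key'
--
-- FIDES_PARENT_NAME = 'parent_key'
--
--
-- def convert_categories_to_nested_dict(categories: List[dict]) -> dict:
--     """Same-module helper kept from the original: build the nested key dict."""
--
--     def nested_dict(data: dict, keys: List) -> None:
--         for key in keys:
--             if key in data:
--                 if key == keys[-1]:
--                     data[key] = {}
--                 data = data[key]
--             else:
--                 data[key] = {}
--
--     nested_output = {}
--     for c in categories:
--         if FIDES_PARENT_NAME not in c:
--             nested_output[c[FIDES_KEY_NAME]] = {}
--         else:
--             nested_dict(nested_output, c[FIDES_KEY_NAME].split('.'))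
--     return nested_output
--
--
-- def nested_categories_to_html_list(categories: List[dict], indent: int = 1) -> str:
--     """Iterative rendering: explicit stack of frames, each node's block is
--     assembled in post-order (children first) instead of a recursive generator."""
--     nested = convert_categories_to_nested_dict(categories)
--     # frame = [pending children, depth, finished child blocks, key or None]
--     stack = [[list(nested.items()), indent, [], None]]
--     result = []
--     while stack:
--         frame = stack[-1]
--         if frame[0]:
--             k, v = frame[0].pop(0)
--             stack.append([list(v.items()), frame[1] + 1, [], k])
--         else:
--             stack.pop()
--             pending, depth, done, key = frame
--             if key is None:
--                 result = done
--             else: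
--                 sp = '   ' * (depth - 1)
--                 block = '{}<li>{}</li>\n{}<ul>\n{}\n{}</ul>'.format(
--                     sp, key, sp, '\n'.join(done), sp)
--                 stack[-1][2].append(block)
--     header = '<h2>Fides Data Category Hierarchy</h2>'
--     return header + '\n' + '\n'.join(result)
-- ===== Notes on version B (the rewrite author's own statement) =====
-- stated objective: alternative
-- what changed: The recursive generator nest_to_html is replaced by an explicit iterative stack traversal: frames of (pending children, depth, finished blocks) are pushed and popped, and each node's HTML block is assembled in post-order from its children's finished blocks instead of being yielded by nested recursive generators.
import Mathlib
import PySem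

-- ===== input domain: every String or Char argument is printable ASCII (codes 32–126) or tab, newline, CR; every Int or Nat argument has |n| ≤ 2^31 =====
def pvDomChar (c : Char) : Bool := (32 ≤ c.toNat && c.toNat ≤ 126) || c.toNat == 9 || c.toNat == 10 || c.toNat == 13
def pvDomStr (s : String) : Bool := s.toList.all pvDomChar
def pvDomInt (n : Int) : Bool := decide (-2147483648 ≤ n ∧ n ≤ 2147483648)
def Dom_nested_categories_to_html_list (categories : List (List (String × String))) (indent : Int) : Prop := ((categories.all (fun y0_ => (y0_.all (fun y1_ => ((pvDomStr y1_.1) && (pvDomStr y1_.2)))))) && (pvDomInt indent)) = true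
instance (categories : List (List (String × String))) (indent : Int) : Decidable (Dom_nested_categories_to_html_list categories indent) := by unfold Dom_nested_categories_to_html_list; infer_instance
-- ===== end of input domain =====

-- B rewrites the recursive generator `nest_to_html` as an explicit iterative stack
-- traversal assembling each node's block in post-order (objective: alternative, same cost).

-- ===== SHARED HELPERS (the same-module helper `convert_categories_to_nested_dict`,
-- used verbatim by both Pythons; ported once and called by both ports) =====

-- The nested dictionary of A's `convert_categories_to_nested_dict`: an insertion-ordered
-- association list key → children (a Python dict whose values are dicts; explicit
-- child/rest constructors because a nested inductive through List is not allowed).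
inductive Forest where
  | nil : Forest
  | cons : String → Forest → Forest → Forest
deriving DecidableEq, Repr

-- `key in data` / `data[key]` on the nested dict (first = only match; keys unique by construction)
def Forest.get? : Forest → String → Option Forest
  | .nil, _ => none
  | .cons k c r, x => if k == x then some c else Forest.get? r x

-- `data[key] = v`: overwrite keeps position, a new key appends (Python dict assignment)
def Forest.set : Forest → String → Forest → Forest
  | .nil, x, v => .cons x v .nil
  | .cons k c r, x, v => if k == x then .cons k v r else .cons k c (Forest.set r x v)

-- hand port of the inner `nested_dict(data, keys)` loop: Python mutates through the
-- alias `data`; each iteration's mutations happen at or below the alias, so the loop is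
-- rendered as a recursion returning the updated sub-dict (exact).  `keys[-1]` is the
-- last element of the original list, which equals the last element of every suffix.
def nestedDictIns (data : Forest) (keys : List String) : Forest :=
  match keys with
  | [] => data
  | key :: rest =>
    match data.get? key with
    | some child =>
      -- `if key == keys[-1]: data[key] = {}` then `data = data[key]`
      let child' := if key == List.getLast (key :: rest) (by simp) then Forest.nil else child
      data.set key (nestedDictIns child' rest)
    | none =>
      -- `data[key] = {}` (the alias `data` itself is NOT advanced in this branch)
      nestedDictIns (data.set key Forest.nil) rest

-- `'   ' * indent_factor` (negative repeat count gives the empty string, as in Python)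
def spacing (indentFactor : Int) : String := String.join (List.replicate indentFactor.toNat "   ")

-- port of `convert_categories_to_nested_dict` (c['fides_key']: KeyError when absent is
-- excluded by Pre_, the port reads "" there; split? with the non-empty separator "." is
-- always `some`)
def convert_categories_to_nested_dict (categories : List (List (String × String))) : Forest :=
  categories.foldl (fun nested_output c =>
    if (PySem.Dict.contains (PySem.Dict.mk c) "parent_key") = false then
      nested_output.set (PySem.Dict.getD (PySem.Dict.mk c) "fides_key" "") Forest.nil
    else
      nestedDictIns nested_output
        ((PySem.Str.split? (PySem.Dict.getD (PySem.Dict.mk c) "fides_key" "") ".").getD []))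
    Forest.nil

-- ===== PORT A =====

-- the recursive generator `nest_to_html`, as the list of its yields (two per item)
def nestToHtml (f : Forest) (indentFactor : Int) : List String :=
  match f with
  | .nil => []
  | .cons k v rest =>
    (spacing indentFactor ++ "<li>" ++ k ++ "</li>") ::
    (spacing indentFactor ++ "<ul>\n" ++ PySem.Str.join "\n" (nestToHtml v (indentFactor + 1))
       ++ "\n" ++ spacing indentFactor ++ "</ul>") ::
    nestToHtml rest indentFactor

def nested_categories_to_html_list (categories : List (List (String × String))) (indent : Int) : String :=
  let nested_categories := convert_categories_to_nested_dict categories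
  let header := "<h2>Fides Data Category Hierarchy</h2>"
  let categories_tree := PySem.Str.join "\n" (nestToHtml nested_categories indent)
  header ++ "\n" ++ categories_tree

-- ===== PORT B =====

-- a stack frame of Source B: (pending children, depth, finished child blocks, key or None);
-- the head of the list is the top of the stack
def frameWeight : Forest → Nat
  | .nil => 0
  | .cons _ c r => 2 + frameWeight c + frameWeight r

-- Source B's while loop over the explicit stack (returns `result` when the root frame pops)
def loopB (stack : List (Forest × Int × List String × Option String)) : List String :=
  match stack with
  | [] => []   -- `while stack`: loop over, no root frame was popped (unreachable from the entry)
  | (pending, depth, done, key) :: below =>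
    match pending with
    | .cons k v rest =>
      -- pop the first pending child, push its frame on top
      loopB ((v, depth + 1, [], some k) :: (rest, depth, done, key) :: below)
    | .nil =>
      match key with
      | none => done   -- root frame popped: `result = done`, stack is empty, loop ends
      | some k0 =>
        match below with
        | [] => []   -- unreachable: a keyed frame always has a parent frame below
        | (p2, d2, done2, k2) :: below2 =>
          loopB ((p2, d2, done2 ++
            [spacing (depth - 1) ++ "<li>" ++ k0 ++ "</li>" ++ "\n" ++ spacing (depth - 1) ++ "<ul>\n"
              ++ PySem.Str.join "\n" done ++ "\n" ++ spacing (depth - 1) ++ "</ul>"], k2) :: below2)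
termination_by (stack.map (fun fr => 1 + frameWeight fr.1)).sum
decreasing_by
  · simp [frameWeight]; omega
  · simp

def nested_categories_to_html_list_alt (categories : List (List (String × String))) (indent : Int) : String :=
  let nested := convert_categories_to_nested_dict categories
  let result := loopB [(nested, indent, [], none)]
  let header := "<h2>Fides Data Category Hierarchy</h2>"
  header ++ "\n" ++ PySem.Str.join "\n" result

-- ===== PRECONDITION & SPEC =====
-- Pre_ excludes exactly the dicts without a 'fides_key' key, on which A raises KeyError.
def Pre_nested_categories_to_html_list (categories : List (List (String × String))) (indent : Int) : Prop :=
  ∀ c ∈ categories, (PySem.Dict.contains (PySem.Dict.mk c) "fides_key") = true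
instance (categories : List (List (String × String))) (indent : Int) : Decidable (Pre_nested_categories_to_html_list categories indent) := by unfold Pre_nested_categories_to_html_list; infer_instance

def pvWitness_nested_categories_to_html_list : (List (List (String × String))) × Int :=
  ([[("fides_key", "a")], [("fides_key", "a.b"), ("parent_key", "a")]], 1)

def Spec_nested_categories_to_html_list (categories : List (List (String × String))) (indent : Int) (out : String) : Prop := out = nested_categories_to_html_list_alt categories indent
instance (categories : List (List (String × String))) (indent : Int) (out : String) : Decidable (Spec_nested_categories_to_html_list categories indent out) := by unfold Spec_nested_categories_to_html_list; infer_instance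

-- ===== CLAIM (what is proved, stated in full; the proofs are below) =====
def Claim_equal_nested_categories_to_html_list : Prop := ∀ (categories : List (List (String × String))) (indent : Int), Dom_nested_categories_to_html_list categories indent → Pre_nested_categories_to_html_list categories indent → Spec_nested_categories_to_html_list categories indent (nested_categories_to_html_list categories indent)

-- ===== LEMMAS AND PROOFS =====

-- the per-node blocks B assembles: li-line ++ '\n' ++ ul-block, one string per key
def blocks (f : Forest) (i : Int) : List String :=
  match f with
  | .nil => []
  | .cons k v rest =>
    (spacing i ++ "<li>" ++ k ++ "</li>" ++ "\n" ++ spacing i ++ "<ul>\n"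
      ++ PySem.Str.join "\n" (blocks v (i + 1)) ++ "\n" ++ spacing i ++ "</ul>")
    :: blocks rest i

-- '\n'.join glues two adjacent pieces into one (List Char level)
lemma chars_join_merge0 (x y : List Char) (L : List (List Char)) :
    PySem.Chars.join ['\n'] (x :: y :: L) = PySem.Chars.join ['\n'] ((x ++ '\n' :: y) :: L) := by
  cases L with
  | nil => simp [PySem.Chars.join, List.intercalate]
  | cons z L => simp [PySem.Chars.join_cons_cons]

lemma chars_join_merge (pre : List (List Char)) (x y : List Char) (L : List (List Char)) :
    PySem.Chars.join ['\n'] (pre ++ x :: y :: L) = PySem.Chars.join ['\n'] (pre ++ (x ++ '\n' :: y) :: L) := by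
  induction pre with
  | nil => exact chars_join_merge0 x y L
  | cons p pre ih =>
    cases pre with
    | nil =>
      simp only [List.nil_append, List.cons_append]
      conv_lhs => rw [PySem.Chars.join_cons_cons]
      conv_rhs => rw [PySem.Chars.join_cons_cons]
      rw [chars_join_merge0]
    | cons q pre' =>
      simp only [List.cons_append] at *
      conv_lhs => rw [PySem.Chars.join_cons_cons]
      conv_rhs => rw [PySem.Chars.join_cons_cons]
      rw [ih]

-- the same on String
lemma join_merge (pre : List String) (x y : String) (L : List String) :
    PySem.Str.join "\n" (pre ++ x :: y :: L) = PySem.Str.join "\n" (pre ++ (x ++ "\n" ++ y) :: L) := by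
  have hnl : ("\n" : String).toList = ['\n'] := rfl
  simp only [PySem.Str.join, List.map_append, List.map_cons, String.toList_append, hnl,
    List.append_assoc, List.singleton_append]
  congr 1
  exact chars_join_merge _ _ _ _

-- the joined yields of A's generator equal the joined blocks of B, under any prefix
lemma join_nestToHtml_eq_blocks (f : Forest) (i : Int) (pre : List String) :
    PySem.Str.join "\n" (pre ++ nestToHtml f i) = PySem.Str.join "\n" (pre ++ blocks f i) := by
  induction f generalizing i pre with
  | nil => rfl
  | cons k v rest ihv ihr =>
    rw [nestToHtml, blocks]
    have hv := ihv (i + 1) []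
    simp only [List.nil_append] at hv
    rw [hv, join_merge]
    have h := ihr i (pre ++ [spacing i ++ "<li>" ++ k ++ "</li>" ++ "\n" ++ spacing i ++ "<ul>\n"
      ++ PySem.Str.join "\n" (blocks v (i + 1)) ++ "\n" ++ spacing i ++ "</ul>"])
    simp only [List.append_assoc, List.singleton_append] at h
    simpa [String.append_assoc] using h

-- running Source B's loop on a frame finishes it into its blocks
lemma loopB_run (f : Forest) (d : Int) (done : List String) (key : Option String)
    (below : List (Forest × Int × List String × Option String)) :
    loopB ((f, d, done, key) :: below) = loopB ((Forest.nil, d, done ++ blocks f d, key) :: below) := by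
  induction f generalizing d done key below with
  | nil => simp [blocks]
  | cons k v rest ihv ihr =>
    rw [loopB]
    rw [ihv (d + 1) [] (some k) ((rest, d, done, key) :: below)]
    rw [loopB]
    simp only [List.nil_append, add_sub_cancel_right]
    rw [ihr d _ key below]
    rw [blocks]
    simp [String.append_assoc]

theorem nested_categories_to_html_list_spec' (categories : List (List (String × String))) (indent : Int) :
    nested_categories_to_html_list categories indent = nested_categories_to_html_list_alt categories indent := by
  show "<h2>Fides Data Category Hierarchy</h2>" ++ "\n"
      ++ PySem.Str.join "\n" (nestToHtml (convert_categories_to_nested_dict categories) indent)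
    = "<h2>Fides Data Category Hierarchy</h2>" ++ "\n"
      ++ PySem.Str.join "\n" (loopB [(convert_categories_to_nested_dict categories, indent, [], none)])
  rw [loopB_run, loopB]
  have h := join_nestToHtml_eq_blocks (convert_categories_to_nested_dict categories) indent []
  simp only [List.nil_append] at h ⊢
  rw [h]

-- ===== VERDICT (by name: the statement is the Claim_ definition above) =====
theorem nested_categories_to_html_list_spec : Claim_equal_nested_categories_to_html_list := by
  intro categories indent _ _
  exact nested_categories_to_html_list_spec' categories indent
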